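-- pv_equiv track=rewrite | github.com/AlgoAlgo42/AlgoAlgo | 조이스틱/kyoon.py | countstraight
-- ===== SOURCE A (Python) =====
-- def countstraight(name):
--     cnt1 = 0
--     cnt2 = 0
--     tmp = 0
--
--     for i in range(1, len(name)):
--         if name[i] == 'A':
--             tmp += 1
--         else:
--             cnt1 += 1 + tmp
--             tmp = 0
--     tmp = 0
--     for i in range(len(name) - 1, 0, -1):
--         if name[i] == 'A':
--             tmp += 1
--         else:
--             cnt2 += 1 + tmp
--             tmp = 0
--     return min(cnt1, cnt2)
-- ===== SOURCE B (Python) =====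
-- def countstraight(name):
--     idx = [i for i in range(1, len(name)) if name[i] != 'A']
--     if not idx:
--         return 0
--     return min(idx[-1], len(name) - idx[0])
-- ===== Notes on version B (the rewrite author's own statement) =====
-- stated objective: simpler
-- what changed: Replaces the two directional accumulator scans (run-length counters cnt1/cnt2/tmp) with a single comprehension collecting the indices whose letter needs a press, and the closed form min(last such index, len - first such index).
import Mathlib
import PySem

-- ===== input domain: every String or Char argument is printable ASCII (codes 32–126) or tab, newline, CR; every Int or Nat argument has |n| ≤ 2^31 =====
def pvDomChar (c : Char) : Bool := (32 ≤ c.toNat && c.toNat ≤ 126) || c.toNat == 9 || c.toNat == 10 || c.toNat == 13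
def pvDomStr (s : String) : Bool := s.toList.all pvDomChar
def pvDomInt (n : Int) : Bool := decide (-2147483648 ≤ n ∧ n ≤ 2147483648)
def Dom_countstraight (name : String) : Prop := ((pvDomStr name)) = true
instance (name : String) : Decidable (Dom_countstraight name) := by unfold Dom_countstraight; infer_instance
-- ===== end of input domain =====

-- B replaces A's two directional accumulator scans by one collection of the non-'A'
-- indices and the closed form min(last index, len - first index)  (objective: simpler).

-- ===== PORT A =====
def countstraight (name : String) : Int :=
  let n : Int := PySem.Str.len name
  let s1 := (PySem.List.pyRange 1 n 1).foldl
    (fun (st : Int × Int) i =>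
      if PySem.Str.pyGet? name i = some 'A' then (st.1, st.2 + 1)
      else (st.1 + (1 + st.2), 0)) (0, 0)
  let s2 := (PySem.List.pyRange (n - 1) 0 (-1)).foldl
    (fun (st : Int × Int) i =>
      if PySem.Str.pyGet? name i = some 'A' then (st.1, st.2 + 1)
      else (st.1 + (1 + st.2), 0)) (0, 0)
  min s1.1 s2.1

-- ===== PORT B =====
def countstraight_alt (name : String) : Int :=
  let n : Int := PySem.Str.len name
  let idx := (PySem.List.pyRange 1 n 1).filter
    (fun i => decide (¬ PySem.Str.pyGet? name i = some 'A'))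
  if idx = [] then 0
  else min (PySem.List.pyGetD idx (-1) 0) (n - PySem.List.pyGetD idx 0 0)

-- ===== PRECONDITION & SPEC =====
def Spec_countstraight (name : String) (out : Int) : Prop := out = countstraight_alt name
instance (name : String) (out : Int) : Decidable (Spec_countstraight name out) := by unfold Spec_countstraight; infer_instance

-- ===== CLAIM (what is proved, stated in full; the proofs are below) =====
def Claim_equal_countstraight : Prop := ∀ (name : String), Dom_countstraight name → Spec_countstraight name (countstraight name)

-- ===== LEMMAS AND PROOFS =====

-- largest i in [1,k] with ¬ q i, else 0
def pvLast (q : Int → Prop) [DecidablePred q] : Nat → Int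
  | 0 => 0
  | k + 1 => if q ((k : Int) + 1) then pvLast q k else ((k : Int) + 1)

-- smallest i in [1,k] with ¬ q i, else 0
def pvFst (q : Int → Prop) [DecidablePred q] : Nat → Int
  | 0 => 0
  | k + 1 => if pvFst q k ≠ 0 then pvFst q k else if q ((k : Int) + 1) then 0 else ((k : Int) + 1)

theorem pvFst_eq_zero_iff (q : Int → Prop) [DecidablePred q] (k : Nat) :
    pvFst q k = 0 ↔ pvLast q k = 0 := by
  induction k with
  | zero => simp [pvFst, pvLast]
  | succ k ih =>
    simp only [pvFst, pvLast]
    by_cases hq : q ((k : Int) + 1) <;> by_cases hf : pvFst q k = 0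
    · rw [if_neg (not_not_intro hf), if_pos hq, if_pos hq]
      simp [ih.mp hf]
    · rw [if_pos hf, if_pos hq]
      exact ih
    · simp [hq, hf]
    · simp [hq, hf]; omega

theorem pvLoop1 (q : Int → Prop) [DecidablePred q] (k : Nat) :
    (PySem.List.pyRange 1 ((k : Int) + 1) 1).foldl
      (fun (st : Int × Int) i => if q i then (st.1, st.2 + 1) else (st.1 + (1 + st.2), 0)) (0, 0)
    = (pvLast q k, (k : Int) - pvLast q k) := by
  induction k with
  | zero => simp [PySem.List.pyRange_one_eq_nil (le_refl (1 : Int)), pvLast]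
  | succ k ih =>
    have h : PySem.List.pyRange 1 (((k : Int) + 1) + 1) 1
        = PySem.List.pyRange 1 ((k : Int) + 1) 1 ++ [(k : Int) + 1] :=
      PySem.List.pyRange_one_succ_right (by omega)
    push_cast
    rw [h, List.foldl_append, ih]
    by_cases hq : q ((k : Int) + 1) <;> simp [pvLast, hq] <;> ring

theorem pvLoop2 (q : Int → Prop) [DecidablePred q] (k : Nat) :
    ∀ (c t : Int), (PySem.List.pyRange (k : Int) 0 (-1)).foldl
      (fun (st : Int × Int) i => if q i then (st.1, st.2 + 1) else (st.1 + (1 + st.2), 0)) (c, t)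
    = if pvFst q k = 0 then (c, t + (k : Int))
      else (c + t + ((k : Int) - pvFst q k + 1), pvFst q k - 1) := by
  induction k with
  | zero => intro c t; simp [PySem.List.pyRange_neg_one_eq_nil (le_refl (0 : Int)), pvFst]
  | succ k ih =>
    intro c t
    have h : PySem.List.pyRange ((k : Int) + 1) 0 (-1)
        = ((k : Int) + 1) :: PySem.List.pyRange (((k : Int) + 1) - 1) 0 (-1) :=
      PySem.List.pyRange_neg_one_cons (by omega)
    have h' : ((k : Int) + 1) - 1 = (k : Int) := by ring
    rw [h'] at h
    push_cast
    rw [h, List.foldl_cons]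
    by_cases hq : q ((k : Int) + 1)
    · rw [if_pos hq, ih]
      have hf1 : pvFst q (k + 1) = pvFst q k := by
        simp only [pvFst]; by_cases hf : pvFst q k = 0 <;> simp [hf, hq]
      rw [hf1]
      by_cases hf : pvFst q k = 0
      · rw [if_pos hf, if_pos hf]; apply Prod.ext <;> (dsimp only; try push_cast; try ring)
      · rw [if_neg hf, if_neg hf]; apply Prod.ext <;> (dsimp only; try push_cast; try ring)
    · rw [if_neg hq, ih]
      by_cases hf : pvFst q k = 0
      · have : pvFst q (k + 1) = (k : Int) + 1 := by simp [pvFst, hf, hq]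
        rw [hf, if_pos rfl, this, if_neg (by omega)]
        apply Prod.ext <;> (dsimp only; try push_cast; try ring)
      · have : pvFst q (k + 1) = pvFst q k := by simp [pvFst, hf]
        rw [if_neg hf, this, if_neg hf]
        apply Prod.ext <;> (dsimp only; try push_cast; try ring)

theorem pvIdx (q : Int → Prop) [DecidablePred q] (k : Nat) :
    ((PySem.List.pyRange 1 ((k : Int) + 1) 1).filter (fun i => decide (¬ q i))).head?
      = (if pvFst q k = 0 then none else some (pvFst q k))
    ∧ ((PySem.List.pyRange 1 ((k : Int) + 1) 1).filter (fun i => decide (¬ q i))).getLast?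
      = (if pvLast q k = 0 then none else some (pvLast q k)) := by
  induction k with
  | zero => simp [PySem.List.pyRange_one_eq_nil (le_refl (1 : Int)), pvFst, pvLast]
  | succ k ih =>
    have h : PySem.List.pyRange 1 (((k : Int) + 1) + 1) 1
        = PySem.List.pyRange 1 ((k : Int) + 1) 1 ++ [(k : Int) + 1] :=
      PySem.List.pyRange_one_succ_right (by omega)
    push_cast
    rw [h, List.filter_append]
    obtain ⟨ih1, ih2⟩ := ih
    by_cases hq : q ((k : Int) + 1)
    · have hd : List.filter (fun i => decide (¬ q i)) [(k : Int) + 1] = [] := by simp [hq]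
      rw [hd, List.append_nil]
      have hf1 : pvFst q (k + 1) = pvFst q k := by
        simp only [pvFst]; by_cases hf : pvFst q k = 0 <;> simp [hf, hq]
      have hl1 : pvLast q (k + 1) = pvLast q k := by simp [pvLast, hq]
      rw [hf1, hl1]
      exact ⟨ih1, ih2⟩
    · have hd : List.filter (fun i => decide (¬ q i)) [(k : Int) + 1] = [(k : Int) + 1] := by
        simp [hq]
      rw [hd]
      constructor
      · rw [List.head?_append, ih1]
        by_cases hf : pvFst q k = 0
        · rw [if_pos hf]
          have hf1 : pvFst q (k + 1) = (k : Int) + 1 := by simp [pvFst, hf, hq]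
          rw [hf1, if_neg (by omega)]
          simp
        · rw [if_neg hf]
          have hf1 : pvFst q (k + 1) = pvFst q k := by simp [pvFst, hf]
          rw [hf1, if_neg hf]
          simp
      · rw [List.getLast?_append]
        have hl1 : pvLast q (k + 1) = (k : Int) + 1 := by simp [pvLast, hq]
        rw [hl1, if_neg (by omega)]
        simp

-- ===== VERDICT (by name: the statement is the Claim_ definition above) =====
theorem countstraight_spec : Claim_equal_countstraight := by
  intro name _
  unfold Spec_countstraight countstraight countstraight_alt
  set q : Int → Prop := fun i => PySem.Str.pyGet? name i = some 'A' with hqdef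
  have hlen : PySem.Str.len name = (name.toList.length : Int) := by
    simp [PySem.Str.len]
  cases hn : name.toList.length with
  | zero =>
    simp only [hlen, hn]
    norm_num [PySem.List.pyRange_one_eq_nil, PySem.List.pyRange_neg_one_eq_nil]
  | succ m =>
    simp only [hlen, hn]
    have e1 := pvLoop1 q m
    have e2 := pvLoop2 q m 0 0
    have e3 := pvIdx q m
    have hcast : ((m + 1 : Nat) : Int) = (m : Int) + 1 := by push_cast; ring
    rw [hcast]
    have hsub : ((m : Int) + 1) - 1 = (m : Int) := by ring
    rw [hsub]
    rw [e1, e2]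
    obtain ⟨e3h, e3l⟩ := e3
    by_cases hf : pvFst q m = 0
    · have hl : pvLast q m = 0 := (pvFst_eq_zero_iff q m).mp hf
      have hnil : (PySem.List.pyRange 1 ((m : Int) + 1) 1).filter (fun i => decide (¬ q i)) = [] := by
        rw [← List.head?_eq_none_iff, e3h, if_pos hf]
      rw [hl, if_pos hf, if_pos hnil]
      simp
    · have hl : pvLast q m ≠ 0 := fun h => hf ((pvFst_eq_zero_iff q m).mpr h)
      have hne : (PySem.List.pyRange 1 ((m : Int) + 1) 1).filter (fun i => decide (¬ q i)) ≠ [] := by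
        intro h; rw [h] at e3h; simp [hf] at e3h
      rw [if_neg hf, if_neg hne]
      have hlast : PySem.List.pyGetD
          ((PySem.List.pyRange 1 ((m : Int) + 1) 1).filter (fun i => decide (¬ q i))) (-1) 0
          = pvLast q m := by
        rw [PySem.List.pyGetD_neg_one _ _ hne]
        have h2 := e3l
        rw [if_neg hl, List.getLast?_eq_some_getLast (h := hne)] at h2
        exact Option.some_inj.mp h2
      have hhead : PySem.List.pyGetD
          ((PySem.List.pyRange 1 ((m : Int) + 1) 1).filter (fun i => decide (¬ q i))) 0 0
          = pvFst q m := by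
        rw [PySem.List.pyGetD_zero]
        have := e3h
        rw [if_neg hf] at this
        cases hL : (PySem.List.pyRange 1 ((m : Int) + 1) 1).filter (fun i => decide (¬ q i)) with
        | nil => exact absurd hL hne
        | cons a l => rw [hL] at this; simp at this; simp [this]
      rw [hlast, hhead]
      congr 1
      ring
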